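-- pv_equiv track=rewrite | github.com/TBates90/pgrid | src/polygrid/core/algorithms.py | ring_faces
-- ===== SOURCE A (Python) =====
-- from typing import TYPE_CHECKING, Dict, Iterable, List
--
-- def ring_faces(
--     face_adjacency: Dict[str, List[str]],
--     start_face_id: str,
--     max_depth: int,
-- ) -> Dict[int, List[str]]:
--     """Return faces grouped by BFS ring distance from a start face."""
--     if max_depth < 0:
--         raise ValueError("max_depth must be >= 0")
--
--     visited = {start_face_id}
--     rings: Dict[int, List[str]] = {0: [start_face_id]}
--     frontier = [start_face_id]
--
--     for depth in range(1, max_depth + 1):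
--         next_frontier: List[str] = []
--         for face_id in frontier:
--             for neighbor in face_adjacency.get(face_id, []):
--                 if neighbor in visited:
--                     continue
--                 visited.add(neighbor)
--                 next_frontier.append(neighbor)
--         if not next_frontier:
--             break
--         rings[depth] = sorted(next_frontier)
--         frontier = next_frontier
--
--     return rings
-- ===== SOURCE B (Python) =====
-- def ring_faces(face_adjacency, start_face_id, max_depth):
--     """Return faces grouped by BFS ring distance from a start face.
--
--     Ball-expansion variant: grow the set of all faces within the current
--     depth and derive each ring as a set difference, instead of keeping a
--     frontier list with per-neighbor visited checks.
--     """
--     if max_depth < 0: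
--         raise ValueError("max_depth must be >= 0")
--
--     rings = {0: [start_face_id]}
--     ball = {start_face_id}
--
--     for depth in range(1, max_depth + 1):
--         reached = set()
--         for face_id in ball:
--             reached.update(face_adjacency.get(face_id, []))
--         ring = sorted(reached - ball)
--         if not ring:
--             break
--         rings[depth] = ring
--         ball |= reached
--
--     return rings
-- ===== Notes on version B (the rewrite author's own statement) =====
-- stated objective: alternative
-- what changed: Replaces A's frontier list with per-neighbor visited checks by growing the whole visited ball each depth and deriving every ring as a set difference (reached minus ball), sorted once.
import Mathlib
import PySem

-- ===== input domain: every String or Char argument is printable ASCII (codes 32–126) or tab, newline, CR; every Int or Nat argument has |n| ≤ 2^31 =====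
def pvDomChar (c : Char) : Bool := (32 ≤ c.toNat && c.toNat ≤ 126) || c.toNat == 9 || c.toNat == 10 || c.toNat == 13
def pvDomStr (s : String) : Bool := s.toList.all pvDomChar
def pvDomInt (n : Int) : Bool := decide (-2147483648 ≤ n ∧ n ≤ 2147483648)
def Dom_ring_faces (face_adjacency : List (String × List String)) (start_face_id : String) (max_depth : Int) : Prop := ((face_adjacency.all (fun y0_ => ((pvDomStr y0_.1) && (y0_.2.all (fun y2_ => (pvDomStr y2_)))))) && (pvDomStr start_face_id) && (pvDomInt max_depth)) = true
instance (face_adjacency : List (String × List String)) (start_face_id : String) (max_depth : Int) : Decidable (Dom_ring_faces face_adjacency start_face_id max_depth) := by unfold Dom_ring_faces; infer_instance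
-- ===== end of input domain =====

-- B replaces A's frontier list + per-neighbor visited bookkeeping by growing the whole
-- visited "ball" and deriving each ring as a set difference (objective: alternative).

-- shared helper: face_adjacency.get(face_id, [])
def adjGet (face_adjacency : List (String × List String)) (face_id : String) : List String :=
  PySem.Dict.getD (PySem.Dict.mk face_adjacency) face_id []

-- ===== PORT A =====
-- body of A's innermost loop: visited-check, add to visited, append to next_frontier
def stepA (p : PySem.Set String × List String) (neighbor : String) :
    PySem.Set String × List String :=
  if neighbor ∈ p.1 then p else (PySem.Set.add p.1 neighbor, p.2 ++ [neighbor])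

-- A's 'for depth in range(1, max_depth+1)' loop (fuel = number of remaining depths; break → return rings)
def ringsLoopA (face_adjacency : List (String × List String)) (fuel : Nat) (depth : Int)
    (visited : PySem.Set String) (rings : PySem.Dict Int (List String))
    (frontier : List String) : PySem.Dict Int (List String) :=
  match fuel with
  | 0 => rings
  | Nat.succ fuel =>
    let st := frontier.foldl (fun p face_id => (adjGet face_adjacency face_id).foldl stepA p)
      (visited, ([] : List String))
    if st.2 = [] then rings
    else ringsLoopA face_adjacency fuel (depth + 1) st.1
      (PySem.Dict.insert rings depth (PySem.List.sorted st.2 (fun x => x) false)) st.2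

def ring_faces (face_adjacency : List (String × List String)) (start_face_id : String) (max_depth : Int) : List (Int × List String) :=
  (ringsLoopA face_adjacency max_depth.toNat 1 (PySem.Set.ofList [start_face_id])
    (PySem.Dict.insert PySem.Dict.empty 0 [start_face_id]) [start_face_id]).items

-- ===== PORT B =====
-- B's 'for depth in range(1, max_depth+1)' loop over the ball
def ringsLoopB (face_adjacency : List (String × List String)) (fuel : Nat) (depth : Int)
    (ball : PySem.Set String) (rings : PySem.Dict Int (List String)) :
    PySem.Dict Int (List String) :=
  match fuel with
  | 0 => rings
  | Nat.succ fuel =>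
    let reached := ball.foldl
      (fun r face_id => PySem.Set.update r (adjGet face_adjacency face_id)) PySem.Set.empty
    let ring := PySem.List.sorted (PySem.Set.diff reached ball) (fun x => x) false
    if ring = [] then rings
    else ringsLoopB face_adjacency fuel (depth + 1) (PySem.Set.union ball reached)
      (PySem.Dict.insert rings depth ring)

def ring_faces_alt (face_adjacency : List (String × List String)) (start_face_id : String) (max_depth : Int) : List (Int × List String) :=
  (ringsLoopB face_adjacency max_depth.toNat 1 (PySem.Set.ofList [start_face_id])
    (PySem.Dict.insert PySem.Dict.empty 0 [start_face_id])).items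

-- ===== PRECONDITION & SPEC =====
-- Pre_ excludes only max_depth < 0, where A raises ValueError (B raises too).
def Pre_ring_faces (face_adjacency : List (String × List String)) (start_face_id : String) (max_depth : Int) : Prop := 0 ≤ max_depth
instance (face_adjacency : List (String × List String)) (start_face_id : String) (max_depth : Int) : Decidable (Pre_ring_faces face_adjacency start_face_id max_depth) := by unfold Pre_ring_faces; infer_instance
def pvWitness_ring_faces : (List (String × List String)) × String × Int := ([("a", ["b", "c"]), ("b", ["d"])], "a", 2)

def Spec_ring_faces (face_adjacency : List (String × List String)) (start_face_id : String) (max_depth : Int) (out : List (Int × List String)) : Prop := out = ring_faces_alt face_adjacency start_face_id max_depth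
instance (face_adjacency : List (String × List String)) (start_face_id : String) (max_depth : Int) (out : List (Int × List String)) : Decidable (Spec_ring_faces face_adjacency start_face_id max_depth out) := by unfold Spec_ring_faces; infer_instance

-- ===== CLAIM (what is proved, stated in full; the proofs are below) =====
def Claim_equal_ring_faces : Prop := ∀ (face_adjacency : List (String × List String)) (start_face_id : String) (max_depth : Int), Dom_ring_faces face_adjacency start_face_id max_depth → Pre_ring_faces face_adjacency start_face_id max_depth → Spec_ring_faces face_adjacency start_face_id max_depth (ring_faces face_adjacency start_face_id max_depth)

-- ===== LEMMAS AND PROOFS =====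

lemma foldA1 (ns : List String) (p : PySem.Set String × List String)
    (hnd : p.2.Nodup) (hsub : ∀ x ∈ p.2, x ∈ p.1) :
    (ns.foldl stepA p).2.Nodup ∧ (∀ x ∈ (ns.foldl stepA p).2, x ∈ (ns.foldl stepA p).1) ∧
    (∀ x, x ∈ (ns.foldl stepA p).1 ↔ x ∈ p.1 ∨ x ∈ ns) ∧
    (∀ x, x ∈ (ns.foldl stepA p).2 ↔ x ∈ p.2 ∨ (x ∉ p.1 ∧ x ∈ ns)) := by
  induction ns generalizing p with
  | nil => exact ⟨hnd, fun x hx => hsub x hx, by simp, by simp⟩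
  | cons n ns ih =>
    by_cases hn : n ∈ p.1
    · simp only [List.foldl_cons, stepA, if_pos hn]
      obtain ⟨h1, h2, h3, h4⟩ := ih p hnd hsub
      refine ⟨h1, h2, fun x => ?_, fun x => ?_⟩
      · rw [h3]; constructor
        · rintro (h | h) <;> simp [h]
        · rintro (h | h)
          · exact Or.inl h
          · rcases List.mem_cons.mp h with rfl | h
            · exact Or.inl hn
            · exact Or.inr h
      · rw [h4]; constructor
        · rintro (h | ⟨h, h'⟩) <;> simp_all
        · rintro (h | ⟨h, h'⟩)
          · exact Or.inl h
          · rcases List.mem_cons.mp h' with rfl | h'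
            · exact absurd hn h
            · exact Or.inr ⟨h, h'⟩
    · simp only [List.foldl_cons, stepA, if_neg hn]
      have hn2 : n ∉ p.2 := fun h => hn (hsub n h)
      have hnd' : (p.2 ++ [n]).Nodup := by
        simp [List.nodup_append, hnd]
        exact fun a ha heq => hn2 (heq ▸ ha)
      have hsub' : ∀ x ∈ p.2 ++ [n], x ∈ PySem.Set.add p.1 n := by
        intro x hx
        rw [PySem.Set.mem_add]
        rcases List.mem_append.mp hx with h | h
        · exact Or.inl (hsub x h)
        · simp at h; exact Or.inr h
      obtain ⟨h1, h2, h3, h4⟩ := ih (PySem.Set.add p.1 n, p.2 ++ [n]) hnd' hsub'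
      refine ⟨h1, h2, fun x => ?_, fun x => ?_⟩
      · rw [h3]; simp [PySem.Set.mem_add]; tauto
      · rw [h4]; simp [PySem.Set.mem_add]
        constructor
        · rintro (⟨h | rfl⟩ | ⟨h', h''⟩) <;> tauto
        · rintro (h | ⟨h', rfl | h''⟩) <;> tauto

lemma foldB (l : List String) (g : String → List String) (r : PySem.Set String)
    (h : r.Nodup) :
    (l.foldl (fun r face_id => PySem.Set.update r (g face_id)) r).Nodup ∧
    (∀ x, x ∈ l.foldl (fun r face_id => PySem.Set.update r (g face_id)) r ↔
      x ∈ r ∨ ∃ f ∈ l, x ∈ g f) := by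
  induction l generalizing r with
  | nil => simp [h]
  | cons a l ih =>
    obtain ⟨h1, h2⟩ := ih (PySem.Set.update r (g a)) (PySem.Set.nodup_update r (g a) h)
    refine ⟨h1, fun x => ?_⟩
    simp only [List.foldl_cons] at *
    rw [h2, PySem.Set.mem_update]
    simp; tauto

set_option maxHeartbeats 1000000 in
lemma foldA (front : List String) (g : String → List String)
    (p : PySem.Set String × List String) (hnd : p.2.Nodup) (hsub : ∀ x ∈ p.2, x ∈ p.1) :
    (front.foldl (fun p face_id => (g face_id).foldl stepA p) p).2.Nodup ∧
    (∀ x ∈ (front.foldl (fun p face_id => (g face_id).foldl stepA p) p).2,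
      x ∈ (front.foldl (fun p face_id => (g face_id).foldl stepA p) p).1) ∧
    (∀ x, x ∈ (front.foldl (fun p face_id => (g face_id).foldl stepA p) p).1 ↔
      x ∈ p.1 ∨ ∃ f ∈ front, x ∈ g f) ∧
    (∀ x, x ∈ (front.foldl (fun p face_id => (g face_id).foldl stepA p) p).2 ↔
      x ∈ p.2 ∨ (x ∉ p.1 ∧ ∃ f ∈ front, x ∈ g f)) := by
  induction front generalizing p with
  | nil => exact ⟨hnd, hsub, by simp, by simp⟩
  | cons a front ih =>
    obtain ⟨k1, k2, k3, k4⟩ := foldA1 (g a) p hnd hsub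
    obtain ⟨h1, h2, h3, h4⟩ := ih ((g a).foldl stepA p) k1 k2
    simp only [List.foldl_cons]
    refine ⟨h1, h2, fun x => ?_, fun x => ?_⟩
    · rw [h3, k3]; simp only [List.mem_cons]; aesop
    · rw [h4, k4, k3]
      simp only [List.mem_cons]
      by_cases hga : x ∈ g a <;> aesop

lemma loop_eq (fa : List (String × List String)) (fuel : Nat) :
    ∀ (depth : Int) (visited ball : PySem.Set String) (rings : PySem.Dict Int (List String))
      (frontier : List String),
    (∀ x, x ∈ visited ↔ x ∈ ball) →
    frontier.Nodup →
    (∀ x ∈ frontier, x ∈ ball) →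
    (∀ f ∈ ball, f ∉ frontier → ∀ n ∈ adjGet fa f, n ∈ ball) →
    ringsLoopA fa fuel depth visited rings frontier = ringsLoopB fa fuel depth ball rings := by
  induction fuel with
  | zero => intros; rfl
  | succ fuel ih =>
    intro depth visited ball rings frontier I1 I2 I3 I4
    obtain ⟨a1, a2, a3, a4⟩ := foldA frontier (adjGet fa) (visited, ([] : List String))
      List.nodup_nil (by simp)
    obtain ⟨b1, b2⟩ := foldB ball (adjGet fa) PySem.Set.empty List.nodup_nil
    set sA := frontier.foldl (fun p face_id => (adjGet fa face_id).foldl stepA p)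
      (visited, ([] : List String)) with hsA
    set reached := ball.foldl (fun r face_id => PySem.Set.update r (adjGet fa face_id))
      PySem.Set.empty with hreached
    have hmemA : ∀ x, x ∈ sA.2 ↔ (x ∉ visited ∧ ∃ f ∈ frontier, x ∈ adjGet fa f) := by
      intro x; rw [a4 x]; simp
    have hmemR : ∀ x, x ∈ reached ↔ ∃ f ∈ ball, x ∈ adjGet fa f := by
      intro x; rw [b2 x]; simp [PySem.Set.empty]
    have hset : ∀ x, x ∈ sA.2 ↔ x ∈ PySem.Set.diff reached ball := by
      intro x
      rw [hmemA, PySem.Set.mem_diff, hmemR]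
      constructor
      · rintro ⟨hv, f, hf, hx⟩
        exact ⟨⟨f, I3 f hf, hx⟩, fun hb => hv ((I1 x).mpr hb)⟩
      · rintro ⟨⟨f, hf, hx⟩, hb⟩
        refine ⟨fun hv => hb ((I1 x).mp hv), ?_⟩
        by_cases hff : f ∈ frontier
        · exact ⟨f, hff, hx⟩
        · exact absurd (I4 f hf hff x hx) hb
    have hndD : (PySem.Set.diff reached ball).Nodup := PySem.Set.nodup_diff reached ball b1
    have hperm : sA.2.Perm (PySem.Set.diff reached ball) :=
      (List.perm_ext_iff_of_nodup a1 hndD).mpr hset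
    have hsorted : PySem.List.sorted sA.2 (fun x => x) false
        = PySem.List.sorted (PySem.Set.diff reached ball) (fun x => x) false :=
      PySem.List.sorted_eq_sorted_of_perm _ _ _ (fun _ _ h => h) hperm
    have hnil : (sA.2 = []) ↔
        (PySem.List.sorted (PySem.Set.diff reached ball) (fun x => x) false = []) := by
      rw [PySem.List.sorted_eq_nil_iff]
      constructor
      · intro h; exact (h ▸ hperm).nil_eq.symm
      · intro h; exact (h ▸ hperm).eq_nil
    show (if sA.2 = [] then rings else _) = (if PySem.List.sorted (PySem.Set.diff reached ball) (fun x => x) false = [] then rings else _)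
    by_cases hA : sA.2 = []
    · rw [if_pos hA, if_pos (hnil.mp hA)]
    · rw [if_neg hA, if_neg (fun h => hA (hnil.mpr h)), hsorted]
      apply ih
      · intro x
        rw [a3 x, PySem.Set.mem_union, hmemR]
        constructor
        · rintro (hv | ⟨f, hf, hx⟩)
          · exact Or.inl ((I1 x).mp hv)
          · exact Or.inr ⟨f, I3 f hf, hx⟩
        · rintro (hb | ⟨f, hf, hx⟩)
          · exact Or.inl ((I1 x).mpr hb)
          · by_cases hff : f ∈ frontier
            · exact Or.inr ⟨f, hff, hx⟩
            · exact Or.inl ((I1 x).mpr (I4 f hf hff x hx))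
      · exact a1
      · intro x hx
        rw [PySem.Set.mem_union]
        have hd := (hset x).mp hx
        rw [PySem.Set.mem_diff] at hd
        exact Or.inr hd.1
      · intro f hf hnf n hn
        rw [PySem.Set.mem_union] at hf ⊢
        rcases hf with hb | hr
        · exact Or.inr ((hmemR n).mpr ⟨f, hb, hn⟩)
        · by_cases hb : f ∈ ball
          · exact Or.inr ((hmemR n).mpr ⟨f, hb, hn⟩)
          · have hd : f ∈ PySem.Set.diff reached ball := by
              rw [PySem.Set.mem_diff]; exact ⟨hr, hb⟩
            exact absurd ((hset f).mpr hd) hnf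

-- ===== VERDICT (by name: the statement is the Claim_ definition above) =====
theorem ring_faces_spec : Claim_equal_ring_faces := by
  intro fa s maxd _ _
  unfold Spec_ring_faces ring_faces ring_faces_alt
  rw [loop_eq fa maxd.toNat 1 (PySem.Set.ofList [s]) (PySem.Set.ofList [s]) _ [s]
    (fun x => Iff.rfl) (List.nodup_singleton s)
    (by intro x hx; simpa using hx)
    (by intro f hf hnf; simp at hf; simp [hf] at hnf)]
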